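-- pv_equiv track=rewrite | github.com/pypi-data/pypi-mirror-50 | packages/atman-kg-nlp/atman_kg_nlp-0.1.20-py3-none-any.whl/atman_kg_nlp/preprocess.py | check_sentence_incomplete
-- ===== SOURCE A (Python) =====
-- def check_sentence_incomplete(phrase):
--     opening = tuple('({[')
--     closing = tuple(')}]')
--     mapping = dict(zip(opening, closing))
--     queue = []
--
--     for letter in phrase:
--         if letter in opening:
--             queue.append(mapping[letter])
--         elif letter in closing:
--             if len(queue) == 0 or letter != queue.pop():
--                 return True
--     return len(queue) > 0 \
--            or phrase.endswith('-') \
--            or phrase.count('"') % 2 != 0 \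
--            or phrase.endswith('i.e.')
-- ===== SOURCE B (Python) =====
-- def check_sentence_incomplete(phrase):
--     s = ''.join(ch for ch in phrase if ch in '()[]{}')
--     while True:
--         t = s.replace('()', '').replace('[]', '').replace('{}', '')
--         if t == s:
--             break
--         s = t
--     return len(s) > 0 \
--            or phrase.endswith('-') \
--            or phrase.count('"') % 2 != 0 \
--            or phrase.endswith('i.e.')
-- ===== Notes on version B (the rewrite author's own statement) =====
-- stated objective: alternative
-- what changed: The explicit stack/early-return bracket matcher is replaced by filtering the phrase down to its bracket characters and repeatedly deleting adjacent matched open-close pairs via str.replace until a fixpoint; bracket imbalance becomes a nonempty irreducible residue, the ending/quote-parity checks stay identical.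
import Mathlib
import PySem

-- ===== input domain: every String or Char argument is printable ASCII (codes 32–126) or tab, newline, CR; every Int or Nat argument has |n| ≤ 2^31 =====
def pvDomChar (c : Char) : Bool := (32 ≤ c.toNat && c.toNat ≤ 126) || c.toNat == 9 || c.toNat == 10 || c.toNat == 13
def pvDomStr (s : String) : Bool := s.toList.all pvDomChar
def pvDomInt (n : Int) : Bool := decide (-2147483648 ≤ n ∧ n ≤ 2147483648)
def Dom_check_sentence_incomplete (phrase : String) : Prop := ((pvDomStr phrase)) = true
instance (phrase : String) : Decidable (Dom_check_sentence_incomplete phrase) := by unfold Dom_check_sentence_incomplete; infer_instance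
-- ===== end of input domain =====

-- B replaces A's explicit stack matcher by filtering out the bracket characters and repeatedly
-- deleting adjacent matched pairs via str.replace until a fixpoint (alternative algorithm; the
-- timing run measured B faster at the largest size).

-- ===== PORT A =====
-- A's loop with early return: state 'none' = the early 'return True' has fired, 'some queue' = the stack.
def csiStep (opening closing : List Char) (mapping : PySem.Dict Char Char)
    (st : Option (List Char)) (letter : Char) : Option (List Char) :=
  match st with
  | none => none
  | some queue =>
    if letter ∈ opening then
      -- mapping[letter]: the key is always present here (letter ∈ opening), so the default is never used
      some (queue ++ [PySem.Dict.getD mapping letter letter])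
    else if letter ∈ closing then
      if queue.length = 0 then none
      else
        match PySem.List.pop? queue with  -- queue.pop()
        | some (x, rest) => if letter ≠ x then none else some rest
        | none => none  -- unreachable: queue ≠ []
    else some queue

def check_sentence_incomplete (phrase : String) : Bool :=
  let opening : List Char := ['(', '{', '[']
  let closing : List Char := [')', '}', ']']
  let mapping : PySem.Dict Char Char := PySem.Dict.ofList (opening.zip closing)
  match phrase.toList.foldl (csiStep opening closing mapping) (some []) with
  | none => true
  | some queue =>
      decide (0 < queue.length) || PySem.Str.endswith phrase "-" ||
      decide (PySem.Str.count phrase "\"" % 2 ≠ 0) || PySem.Str.endswith phrase "i.e."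

-- ===== PORT B =====
-- proof-of-termination helpers for B's while-loop: one replace with "" only deletes, so it yields a sublist
def csiRep (o c : Char) : List Char → List Char
  | [] => []
  | [a] => [a]
  | a :: b :: t => if a = o ∧ b = c then csiRep o c t else a :: csiRep o c (b :: t)

theorem csiRep_sublist (o c : Char) (l : List Char) : (csiRep o c l).Sublist l := by
  induction l using csiRep.induct o c with
  | case1 => simp [csiRep]
  | case2 a => simp [csiRep]
  | case3 a b t h ih =>
      simp only [csiRep, if_pos h]
      exact ih.trans ((List.sublist_cons_self b t).trans (List.sublist_cons_self a (b :: t)))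
  | case4 a b t h ih =>
      simp only [csiRep, if_neg h]
      exact ih.cons₂ a

theorem csiGo_eq (o c : Char) : ∀ (fuel : Nat) (l acc : List Char), l.length ≤ fuel →
    PySem.Chars.replace.go [o, c] [] fuel l acc = acc.reverse ++ csiRep o c l := by
  intro fuel
  induction fuel with
  | zero =>
    intro l acc h
    have hl : l = [] := List.eq_nil_of_length_eq_zero (Nat.le_zero.mp h)
    subst hl; simp [PySem.Chars.replace.go, csiRep]
  | succ k ih =>
    intro l acc h
    match l with
    | [] => simp [PySem.Chars.replace.go, csiRep]
    | [a] =>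
      have hp : List.isPrefixOf [o, c] [a] = false := by simp [List.isPrefixOf]
      rw [PySem.Chars.replace.go]
      simp only [hp, Bool.false_eq_true, if_false]
      rw [ih [] (a :: acc) (by simp)]
      simp [csiRep]
    | a :: b :: t =>
      rw [PySem.Chars.replace.go]
      by_cases hab : a = o ∧ b = c
      · obtain ⟨h1, h2⟩ := hab; subst h1; subst h2
        have hp : List.isPrefixOf [a, b] (a :: b :: t) = true := by simp [List.isPrefixOf]
        simp only [hp, if_true, List.length_cons, List.drop_succ_cons, List.reverse_nil, List.nil_append, List.length_nil, List.drop]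
        rw [ih t acc (by simp at h; omega)]
        simp [csiRep]
      · have hp : List.isPrefixOf [o, c] (a :: b :: t) = false := by
          simp [List.isPrefixOf]
          intro h1 h2; exact hab ⟨h1.symm, h2.symm⟩
        simp only [hp, Bool.false_eq_true, if_false]
        rw [ih (b :: t) (a :: acc) (by simp at h ⊢; omega)]
        simp [csiRep, hab]

theorem csiReplace_eq_rep (o c : Char) (s : List Char) :
    PySem.Chars.replace s [o, c] [] = csiRep o c s := by
  have : ¬ ([o, c].isEmpty = true) := by simp
  rw [PySem.Chars.replace, if_neg this, csiGo_eq o c s.length s [] (le_refl _)]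
  simp

def csiReduceOnce (s : List Char) : List Char :=
  PySem.Chars.replace (PySem.Chars.replace (PySem.Chars.replace s ['(', ')'] []) ['[', ']'] []) ['{', '}'] []

theorem csiReduceOnce_sublist (s : List Char) : (csiReduceOnce s).Sublist s := by
  unfold csiReduceOnce
  rw [csiReplace_eq_rep, csiReplace_eq_rep, csiReplace_eq_rep]
  exact (csiRep_sublist _ _ _).trans ((csiRep_sublist _ _ _).trans (csiRep_sublist _ _ _))

-- B's 'while True: t = s.replace(...); if t == s: break; s = t' loop
def altReduce (s : List Char) : List Char :=
  if csiReduceOnce s = s then s else altReduce (csiReduceOnce s)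
termination_by s.length
decreasing_by
  have hs := csiReduceOnce_sublist s
  exact Nat.lt_of_le_of_ne hs.length_le (fun he => (by assumption : ¬ _ = _) (hs.eq_of_length he))

def check_sentence_incomplete_alt (phrase : String) : Bool :=
  let s := phrase.toList.filter (fun ch => decide (ch ∈ ['(', ')', '[', ']', '{', '}']))
  let s0 := altReduce s
  decide (0 < s0.length) || PySem.Str.endswith phrase "-" ||
  decide (PySem.Str.count phrase "\"" % 2 ≠ 0) || PySem.Str.endswith phrase "i.e."

-- ===== PRECONDITION & SPEC =====
def Spec_check_sentence_incomplete (phrase : String) (out : Bool) : Prop := out = check_sentence_incomplete_alt phrase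
instance (phrase : String) (out : Bool) : Decidable (Spec_check_sentence_incomplete phrase out) := by unfold Spec_check_sentence_incomplete; infer_instance

-- ===== CLAIM (what is proved, stated in full; the proofs are below) =====
def Claim_equal_check_sentence_incomplete : Prop := ∀ (phrase : String), Dom_check_sentence_incomplete phrase → Spec_check_sentence_incomplete phrase (check_sentence_incomplete phrase)

-- ===== LEMMAS AND PROOFS =====

-- A's concrete step function and useful facts about the scan
def csiStepC : Option (List Char) → Char → Option (List Char) :=
  csiStep ['(', '{', '['] [')', '}', ']'] (PySem.Dict.ofList (List.zip ['(', '{', '['] [')', '}', ']']))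

def csiPairs : List (Char × Char) := [('(', ')'), ('{', '}'), ('[', ']')]

def csiIsOp (a : Char) : Bool := decide (a ∈ ['(', '{', '['])

def csiMv (a : Char) : Char :=
  PySem.Dict.getD (PySem.Dict.ofList (List.zip ['(', '{', '['] [')', '}', ']'])) a a

theorem csiFoldl_none (l : List Char) : l.foldl csiStepC none = none := by
  induction l with
  | nil => rfl
  | cons a t ih => simpa [csiStepC, csiStep] using ih

theorem csiStep_nonbracket {a : Char} (h : a ∉ ['(', ')', '[', ']', '{', '}'])
    (st : Option (List Char)) : csiStepC st a = st := by
  cases st with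
  | none => rfl
  | some q =>
    have h1 : a ∉ ['(', '{', '['] := by simp at h ⊢; tauto
    have h2 : a ∉ [')', '}', ']'] := by simp at h ⊢; tauto
    simp only [csiStepC, csiStep]
    rw [if_neg h1, if_neg h2]

theorem csiScan_filter (l : List Char) (st : Option (List Char)) :
    l.foldl csiStepC st = (l.filter (fun ch => decide (ch ∈ ['(', ')', '[', ']', '{', '}']))).foldl csiStepC st := by
  induction l generalizing st with
  | nil => rfl
  | cons a t ih =>
    by_cases hb : a ∈ ['(', ')', '[', ']', '{', '}']
    · rw [List.filter_cons_of_pos (by simpa using hb)]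
      simp only [List.foldl_cons]
      exact ih _
    · rw [List.filter_cons_of_neg (by simpa using hb)]
      simp only [List.foldl_cons, csiStep_nonbracket hb]
      exact ih st

theorem csiPair_absorb {o c : Char} (h : (o, c) ∈ csiPairs) (t : List Char) (st : Option (List Char)) :
    (o :: c :: t).foldl csiStepC st = t.foldl csiStepC st := by
  cases st with
  | none => rfl
  | some q =>
    simp only [List.foldl_cons]
    fin_cases h
    · congr 1
      rw [show csiStepC (some q) '(' = some (q ++ [')']) from rfl]
      simp [csiStepC, csiStep, PySem.List.pop?_last]
    · congr 1
      rw [show csiStepC (some q) '{' = some (q ++ ['}']) from rfl]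
      simp [csiStepC, csiStep, PySem.List.pop?_last]
    · congr 1
      rw [show csiStepC (some q) '[' = some (q ++ [']']) from rfl]
      simp [csiStepC, csiStep, PySem.List.pop?_last]

theorem csiRep_scan {o c : Char} (h : (o, c) ∈ csiPairs) (l : List Char) (st : Option (List Char)) :
    (csiRep o c l).foldl csiStepC st = l.foldl csiStepC st := by
  induction l using csiRep.induct o c generalizing st with
  | case1 => rfl
  | case2 a => rfl
  | case3 a b t hc ih =>
    obtain ⟨rfl, rfl⟩ := hc
    simp only [csiRep, and_self, if_true]
    rw [csiPair_absorb h]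
    exact ih st
  | case4 a b t hc ih =>
    simp only [csiRep, if_neg hc, List.foldl_cons]
    exact ih _

theorem csiRep_fix_no_infix {o c : Char} : ∀ {l : List Char}, csiRep o c l = l →
    ∀ x y : List Char, l ≠ x ++ o :: c :: y := by
  intro l
  induction l using csiRep.induct o c with
  | case1 => intro _ x y h; simp at h
  | case2 a => intro _ x y h; have := congrArg List.length h; simp at this; omega
  | case3 a b t hc ih =>
    intro hfix x y h
    obtain ⟨rfl, rfl⟩ := hc
    have h1 : csiRep a b (a :: b :: t) = csiRep a b t := by
      simp [csiRep]
    rw [h1] at hfix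
    have h2 := (csiRep_sublist a b t).length_le
    have h3 := congrArg List.length hfix
    simp at h3
    omega
  | case4 a b t hc ih =>
    intro hfix x y h
    have h1 : csiRep o c (a :: b :: t) = a :: csiRep o c (b :: t) := by
      simp [csiRep, hc]
    rw [h1] at hfix
    have h2 : csiRep o c (b :: t) = b :: t := by injection hfix
    cases x with
    | nil =>
      injection h with ha h'
      injection h' with hb _
      exact hc ⟨ha, hb⟩
    | cons x0 x' =>
      injection h with _ h'
      exact ih h2 x' y h'

theorem altReduce_fix (s : List Char) : csiReduceOnce (altReduce s) = altReduce s := by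
  induction s using altReduce.induct with
  | case1 s h => rw [altReduce, if_pos h]; exact h
  | case2 s h ih => rw [altReduce, if_neg h]; exact ih

theorem csiReduceOnce_scan (s : List Char) (st : Option (List Char)) :
    (csiReduceOnce s).foldl csiStepC st = s.foldl csiStepC st := by
  unfold csiReduceOnce
  rw [csiReplace_eq_rep, csiReplace_eq_rep, csiReplace_eq_rep]
  rw [csiRep_scan (by decide), csiRep_scan (by decide), csiRep_scan (by decide)]

theorem altReduce_scan (s : List Char) (st : Option (List Char)) :
    (altReduce s).foldl csiStepC st = s.foldl csiStepC st := by
  induction s using altReduce.induct generalizing st with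
  | case1 s h => rw [altReduce, if_pos h]
  | case2 s h ih =>
    rw [altReduce, if_neg h, ih, csiReduceOnce_scan]

theorem altReduce_sublist (s : List Char) : (altReduce s).Sublist s := by
  induction s using altReduce.induct with
  | case1 s h => rw [altReduce, if_pos h]
  | case2 s h ih =>
    rw [altReduce, if_neg h]
    exact ih.trans (csiReduceOnce_sublist s)

theorem csiOpeners_scan (P : List Char) : ∀ (q : List Char), (∀ a ∈ P, a ∈ ['(', '{', '[']) →
    P.foldl csiStepC (some q) = some (q ++ P.map csiMv) := by
  induction P with
  | nil => intro q _; simp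
  | cons a P ih =>
    intro q h
    have ha : a ∈ ['(', '{', '['] := h a List.mem_cons_self
    have hstep : csiStepC (some q) a = some (q ++ [csiMv a]) := by
      simp only [csiStepC, csiStep, csiMv]
      rw [if_pos ha]
    simp only [List.foldl_cons, List.map_cons, hstep]
    rw [ih _ (fun b hb => h b (List.mem_cons_of_mem a hb))]
    simp

-- the key lemma: an irreducible string of brackets scans to an empty stack only if it is empty
theorem csiIrreducible_scan_empty (s : List Char)
    (hbr : ∀ a ∈ s, a ∈ ['(', ')', '[', ']', '{', '}'])
    (hirr : ∀ (o c : Char), (o, c) ∈ csiPairs → ∀ x y : List Char, s ≠ x ++ o :: c :: y)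
    (hscan : s.foldl csiStepC (some []) = some []) : s = [] := by
  have hPr : s.takeWhile csiIsOp ++ s.dropWhile csiIsOp = s := List.takeWhile_append_dropWhile
  have hPopen : ∀ a ∈ s.takeWhile csiIsOp, a ∈ ['(', '{', '['] := by
    intro a ha
    have := List.mem_takeWhile_imp ha
    simpa [csiIsOp] using this
  have hsplit : s.foldl csiStepC (some []) =
      (s.dropWhile csiIsOp).foldl csiStepC (some ((s.takeWhile csiIsOp).map csiMv)) := by
    conv_lhs => rw [← hPr]
    rw [List.foldl_append]
    rw [show (s.takeWhile csiIsOp).foldl csiStepC (some []) = some ((s.takeWhile csiIsOp).map csiMv) by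
      simpa using csiOpeners_scan _ [] hPopen]
  cases hrc : s.dropWhile csiIsOp with
  | nil =>
    rw [hrc, List.foldl_nil, hscan] at hsplit
    have hP : s.takeWhile csiIsOp = [] := by
      have := Option.some.inj hsplit
      exact List.map_eq_nil_iff.mp this.symm
    rw [← hPr, hP, hrc]; rfl
  | cons ch r' =>
    exfalso
    have hno : csiIsOp ch = false := by
      have hne : s.dropWhile csiIsOp ≠ [] := by rw [hrc]; simp
      have h2 := List.head_dropWhile_not csiIsOp hne
      rwa [show (s.dropWhile csiIsOp).head hne = ch from by simp [hrc]] at h2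
    have hnotopen : ch ∉ ['(', '{', '['] := by simpa [csiIsOp] using hno
    have hmem : ch ∈ s := by
      refine (List.dropWhile_sublist csiIsOp).subset ?_
      rw [hrc]; exact List.mem_cons_self
    have hclose : ch ∈ [')', '}', ']'] := by
      have h6 := hbr ch hmem
      simp only [List.mem_cons, List.not_mem_nil, or_false] at h6 hnotopen ⊢
      tauto
    rw [hrc, List.foldl_cons] at hsplit
    rcases List.eq_nil_or_concat (s.takeWhile csiIsOp) with hPe | ⟨P', o, hPc⟩
    · -- queue is empty when the first closer arrives: A's scan fails, contradicting hscan
      have hstep : csiStepC (some ((s.takeWhile csiIsOp).map csiMv)) ch = none := by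
        rw [hPe]
        simp only [csiStepC, csiStep, List.map_nil]
        rw [if_neg hnotopen, if_pos hclose]
        simp
      rw [hstep, csiFoldl_none, hscan] at hsplit
      simp at hsplit
    · have ho : o ∈ ['(', '{', '['] := hPopen o (by simp [hPc])
      have hmap : (s.takeWhile csiIsOp).map csiMv = (P'.map csiMv) ++ [csiMv o] := by
        simp [hPc]
      by_cases hco : ch = csiMv o
      · -- the closer matches the top of the stack: s contains the adjacent pair o, ch
        have hpair : (o, ch) ∈ csiPairs := by
          subst hco
          fin_cases ho <;> decide
        have hs : s = P' ++ o :: ch :: r' := by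
          rw [← hPr, hPc, hrc]
          simp
        exact hirr o ch hpair P' r' hs
      · -- the closer mismatches: A's scan fails, contradicting hscan
        have hstep : csiStepC (some ((s.takeWhile csiIsOp).map csiMv)) ch = none := by
          rw [hmap]
          simp only [csiStepC, csiStep]
          rw [if_neg hnotopen, if_pos hclose, if_neg (by simp), PySem.List.pop?_last]
          simp [hco]
        rw [hstep, csiFoldl_none, hscan] at hsplit
        simp at hsplit

-- ===== VERDICT (by name: the statement is the Claim_ definition above) =====
theorem check_sentence_incomplete_spec : Claim_equal_check_sentence_incomplete := by
  intro phrase _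
  unfold Spec_check_sentence_incomplete
  have hA : check_sentence_incomplete phrase =
      (match phrase.toList.foldl csiStepC (some []) with
       | none => true
       | some queue =>
         decide (0 < queue.length) || PySem.Str.endswith phrase "-" ||
         decide (PySem.Str.count phrase "\"" % 2 ≠ 0) || PySem.Str.endswith phrase "i.e.") := rfl
  have hB : check_sentence_incomplete_alt phrase =
      (decide (0 < (altReduce (phrase.toList.filter (fun ch => decide (ch ∈ ['(', ')', '[', ']', '{', '}'])))).length) ||
       PySem.Str.endswith phrase "-" ||
       decide (PySem.Str.count phrase "\"" % 2 ≠ 0) || PySem.Str.endswith phrase "i.e.") := rfl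
  rw [hA, hB]
  set f := phrase.toList.filter (fun ch => decide (ch ∈ ['(', ')', '[', ']', '{', '}'])) with hf
  set s0 := altReduce f with hs0
  have hscan : s0.foldl csiStepC (some []) = phrase.toList.foldl csiStepC (some []) := by
    rw [hs0, altReduce_scan, hf, ← csiScan_filter]
  have hbr : ∀ a ∈ s0, a ∈ ['(', ')', '[', ']', '{', '}'] := by
    intro a ha
    have hmem := (altReduce_sublist f).subset ha
    rw [hf] at hmem
    simpa using (List.mem_filter.mp hmem).2
  have hirr : ∀ (o c : Char), (o, c) ∈ csiPairs → ∀ x y : List Char, s0 ≠ x ++ o :: c :: y := by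
    have hfix := altReduce_fix f
    rw [← hs0] at hfix
    unfold csiReduceOnce at hfix
    rw [csiReplace_eq_rep, csiReplace_eq_rep, csiReplace_eq_rep] at hfix
    have l1 := (csiRep_sublist '(' ')' s0).length_le
    have l2 := (csiRep_sublist '[' ']' (csiRep '(' ')' s0)).length_le
    have l3 := (csiRep_sublist '{' '}' (csiRep '[' ']' (csiRep '(' ')' s0))).length_le
    have hlen := congrArg List.length hfix
    have e1 : csiRep '(' ')' s0 = s0 := (csiRep_sublist '(' ')' s0).eq_of_length (by omega)
    rw [e1] at hfix
    have l2' := (csiRep_sublist '[' ']' s0).length_le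
    have l3' := (csiRep_sublist '{' '}' (csiRep '[' ']' s0)).length_le
    have hlen2 := congrArg List.length hfix
    have e2 : csiRep '[' ']' s0 = s0 := (csiRep_sublist '[' ']' s0).eq_of_length (by omega)
    rw [e2] at hfix
    intro o c hpc
    fin_cases hpc
    · exact csiRep_fix_no_infix e1
    · exact csiRep_fix_no_infix hfix
    · exact csiRep_fix_no_infix e2
  cases hq : phrase.toList.foldl csiStepC (some []) with
  | none =>
    have hs0ne : s0 ≠ [] := by
      intro h0
      rw [h0] at hscan
      rw [hq] at hscan
      simp at hscan
    have hpos : 0 < s0.length := List.length_pos_iff.mpr hs0ne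
    simp [hpos]
  | some q =>
    have hiff : q = [] ↔ s0 = [] := by
      constructor
      · intro h0
        apply csiIrreducible_scan_empty s0 hbr hirr
        rw [hscan, hq, h0]
      · intro h0
        rw [h0, hq] at hscan
        simpa using hscan.symm
    have hdec : decide (0 < q.length) = decide (0 < s0.length) := by
      by_cases h0 : q = []
      · have h1 := hiff.mp h0
        rw [h0, h1]
      · have h1 : s0 ≠ [] := fun hh => h0 (hiff.mpr hh)
        have hq1 : 0 < q.length := List.length_pos_iff.mpr h0
        have hs1 : 0 < s0.length := List.length_pos_iff.mpr h1
        simp [hq1, hs1]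
    rw [show (match (some q : Option (List Char)) with
       | none => true
       | some queue =>
         decide (0 < queue.length) || PySem.Str.endswith phrase "-" ||
         decide (PySem.Str.count phrase "\"" % 2 ≠ 0) || PySem.Str.endswith phrase "i.e.") =
       (decide (0 < q.length) || PySem.Str.endswith phrase "-" ||
        decide (PySem.Str.count phrase "\"" % 2 ≠ 0) || PySem.Str.endswith phrase "i.e.") from rfl]
    rw [hdec]
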